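-- pv_equiv track=rewrite | github.com/AiLang-Author/AiLang | ailang/generate_5000_tokens.py | generate_token_pools
-- ===== SOURCE A (Python) =====
-- def generate_token_pools(num_tokens=5000, num_dims=32):
--     """Generate FixedPool definitions for tokens"""
--     output = []
--     output.append("// ============================================================================")
--     output.append("// TOKEN EMBEDDINGS - 5000 tokens × 32 dimensions")
--     output.append("// Replace your existing Embeddings_Token_* FixedPools with this")
--     output.append("// ============================================================================\n")
--
--     for token_id in range(num_tokens):
--         output.append(f"FixedPool.Embeddings_Token_{token_id} {{")
--
--         # Generate in groups of 8 per line for readability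
--         for dim_group in range(0, num_dims, 8):
--             line = "    "
--             for i in range(8):
--                 dim = dim_group + i
--                 if dim < num_dims:
--                     line += f'"d{dim}": Initialize=0   '
--             output.append(line.rstrip())
--
--         output.append("}\n")
--
--         # Progress indicator every 500 tokens
--         if (token_id + 1) % 500 == 0:
--             output.append(f"// Progress: {token_id + 1}/{num_tokens} tokens defined\n")
--
--     return "\n".join(output)
-- ===== SOURCE B (Python) =====
-- def generate_token_pools(num_tokens=5000, num_dims=32):
--     """Generate FixedPool definitions for tokens (dimension block built once, pieces pre-joined)"""
--     header = ("// ============================================================================\n"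
--               "// TOKEN EMBEDDINGS - 5000 tokens × 32 dimensions\n"
--               "// Replace your existing Embeddings_Token_* FixedPools with this\n"
--               "// ============================================================================\n")
--     pieces = [header]
--     if num_tokens > 0:
--         # the dimension lines are the same for every token: build them once
--         dim_lines = []
--         for g in range(0, num_dims, 8):
--             parts = ['"d%d": Initialize=0' % d for d in range(g, min(g + 8, num_dims))]
--             dim_lines.append("    " + "   ".join(parts))
--         block_tail = "\n".join(dim_lines + ["}\n"])
--         for t in range(num_tokens):
--             piece = "FixedPool.Embeddings_Token_%d {\n" % t + block_tail
--             if (t + 1) % 500 == 0: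
--                 piece += "\n// Progress: %d/%d tokens defined\n" % (t + 1, num_tokens)
--             pieces.append(piece)
--     return "\n".join(pieces)
-- ===== Notes on version B (the rewrite author's own statement) =====
-- stated objective: faster
-- what changed: B hoists the token-invariant work out of the token loop: the dimension lines are built once (each line as a ' '.join of its entries instead of append-then-rstrip), pre-joined into one block string, and every token's FixedPool is emitted as a single pre-assembled piece, so the nested dimension loops and per-line rstrip no longer run per token.
import Mathlib
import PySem

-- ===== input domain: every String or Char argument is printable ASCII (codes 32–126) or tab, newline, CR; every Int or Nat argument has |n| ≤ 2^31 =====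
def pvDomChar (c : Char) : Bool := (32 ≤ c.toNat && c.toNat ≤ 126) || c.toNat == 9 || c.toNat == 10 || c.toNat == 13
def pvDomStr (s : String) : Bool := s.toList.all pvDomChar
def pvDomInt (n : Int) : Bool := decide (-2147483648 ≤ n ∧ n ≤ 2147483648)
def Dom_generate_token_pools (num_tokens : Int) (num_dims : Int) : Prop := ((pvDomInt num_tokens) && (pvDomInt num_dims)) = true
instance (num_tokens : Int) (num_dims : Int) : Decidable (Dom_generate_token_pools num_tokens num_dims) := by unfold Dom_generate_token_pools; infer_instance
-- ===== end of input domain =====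

-- B builds the token-independent dimension block once and assembles each FixedPool as one
-- pre-joined piece, instead of re-running the nested dimension loops with per-line rstrip
-- for every token.

-- ===== PORT A =====
def generate_token_pools (num_tokens : Int) (num_dims : Int) : String :=
  let output : List String := []
  let output := output ++ ["// ============================================================================"]
  let output := output ++ ["// TOKEN EMBEDDINGS - 5000 tokens × 32 dimensions"]
  let output := output ++ ["// Replace your existing Embeddings_Token_* FixedPools with this"]
  let output := output ++ ["// ============================================================================\n"]
  let output := (PySem.List.pyRange 0 num_tokens 1).foldl (fun output token_id =>
    let output := output ++ ["FixedPool.Embeddings_Token_" ++ PySem.Int.toStr token_id ++ " {"]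
    let output := (PySem.List.pyRange 0 num_dims 8).foldl (fun output dim_group =>
      let line := (PySem.List.pyRange 0 8 1).foldl (fun line i =>
        let dim := dim_group + i
        if dim < num_dims then line ++ "\"d" ++ PySem.Int.toStr dim ++ "\": Initialize=0   " else line) "    "
      output ++ [PySem.Str.rstrip line]) output
    let output := output ++ ["}\n"]
    if PySem.Int.mod (token_id + 1) 500 = 0 then
      output ++ ["// Progress: " ++ PySem.Int.toStr (token_id + 1) ++ "/" ++ PySem.Int.toStr num_tokens ++ " tokens defined\n"]
    else output) output
  PySem.Str.join "\n" output

-- ===== PORT B =====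
def generate_token_pools_alt (num_tokens : Int) (num_dims : Int) : String :=
  let header := "// ============================================================================\n" ++
      "// TOKEN EMBEDDINGS - 5000 tokens × 32 dimensions\n" ++
      "// Replace your existing Embeddings_Token_* FixedPools with this\n" ++
      "// ============================================================================\n"
  let pieces : List String :=
    if 0 < num_tokens then
      let dim_lines : List String := (PySem.List.pyRange 0 num_dims 8).foldl (fun dim_lines g =>
        dim_lines ++ ["    " ++ PySem.Str.join "   "
          ((PySem.List.pyRange g (min (g + 8) num_dims) 1).map (fun d =>
            "\"d" ++ PySem.Int.toStr d ++ "\": Initialize=0"))]) []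
      let block_tail := PySem.Str.join "\n" (dim_lines ++ ["}\n"])
      (PySem.List.pyRange 0 num_tokens 1).foldl (fun pieces t =>
        let piece := "FixedPool.Embeddings_Token_" ++ PySem.Int.toStr t ++ " {\n" ++ block_tail
        let piece := if PySem.Int.mod (t + 1) 500 = 0 then
          piece ++ "\n// Progress: " ++ PySem.Int.toStr (t + 1) ++ "/" ++ PySem.Int.toStr num_tokens ++ " tokens defined\n"
        else piece
        pieces ++ [piece]) [header]
    else [header]
  PySem.Str.join "\n" pieces

-- ===== PRECONDITION & SPEC =====
def Spec_generate_token_pools (num_tokens : Int) (num_dims : Int) (out : String) : Prop := out = generate_token_pools_alt num_tokens num_dims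
instance (num_tokens : Int) (num_dims : Int) (out : String) : Decidable (Spec_generate_token_pools num_tokens num_dims out) := by unfold Spec_generate_token_pools; infer_instance

-- ===== CLAIM (what is proved, stated in full; the proofs are below) =====
def Claim_equal_generate_token_pools : Prop := ∀ (num_tokens : Int) (num_dims : Int), Dom_generate_token_pools num_tokens num_dims → Spec_generate_token_pools num_tokens num_dims (generate_token_pools num_tokens num_dims)

-- ===== LEMMAS AND PROOFS =====

-- proof-only abbreviations
def pvSp3 : List Char := [' ', ' ', ' ']
def pvSp4 : List Char := [' ', ' ', ' ', ' ']
def pvPartL (d : Int) : List Char := "\"d".toList ++ PySem.Int.toChars d ++ "\": Initialize=0".toList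
def pvDimLineA (num_dims g : Int) : String :=
  PySem.Str.rstrip ((PySem.List.pyRange 0 8 1).foldl (fun line i =>
    let dim := g + i
    if dim < num_dims then line ++ "\"d" ++ PySem.Int.toStr dim ++ "\": Initialize=0   " else line) "    ")
def pvDimLineB (num_dims g : Int) : String :=
  "    " ++ PySem.Str.join "   "
    ((PySem.List.pyRange g (min (g + 8) num_dims) 1).map (fun d =>
      "\"d" ++ PySem.Int.toStr d ++ "\": Initialize=0"))

def pvHdr : List String :=
  ["// ============================================================================",
   "// TOKEN EMBEDDINGS - 5000 tokens × 32 dimensions",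
   "// Replace your existing Embeddings_Token_* FixedPools with this",
   "// ============================================================================\n"]
def pvHdrB : String :=
  "// ============================================================================\n" ++
  "// TOKEN EMBEDDINGS - 5000 tokens × 32 dimensions\n" ++
  "// Replace your existing Embeddings_Token_* FixedPools with this\n" ++
  "// ============================================================================\n"
def pvBlockA (num_tokens num_dims t : Int) : List String :=
  ("FixedPool.Embeddings_Token_" ++ PySem.Int.toStr t ++ " {") ::
  ((PySem.List.pyRange 0 num_dims 8).map (pvDimLineA num_dims) ++ ["}\n"] ++
   (if PySem.Int.mod (t + 1) 500 = 0 then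
      ["// Progress: " ++ PySem.Int.toStr (t + 1) ++ "/" ++ PySem.Int.toStr num_tokens ++ " tokens defined\n"]
    else []))
def pvPieceB (num_tokens num_dims t : Int) : String :=
  let piece := "FixedPool.Embeddings_Token_" ++ PySem.Int.toStr t ++ " {\n" ++
    PySem.Str.join "\n" ((PySem.List.pyRange 0 num_dims 8).map (pvDimLineB num_dims) ++ ["}\n"])
  if PySem.Int.mod (t + 1) 500 = 0 then
    piece ++ "\n// Progress: " ++ PySem.Int.toStr (t + 1) ++ "/" ++ PySem.Int.toStr num_tokens ++ " tokens defined\n"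
  else piece

-- join gluing and rstrip lemmas
lemma join_append_ne_nil (sep : List Char) (xs ys : List (List Char)) (hx : xs ≠ []) (hy : ys ≠ []) :
    PySem.Chars.join sep (xs ++ ys) = PySem.Chars.join sep xs ++ sep ++ PySem.Chars.join sep ys := by
  induction xs with
  | nil => exact absurd rfl hx
  | cons x xs ih =>
    cases xs with
    | nil =>
      cases ys with
      | nil => exact absurd rfl hy
      | cons y ys' => simp [PySem.Chars.join_cons_cons, PySem.Chars.join_singleton, List.append_assoc]
    | cons x' xs' =>
      have : (x :: x' :: xs') ++ ys = x :: ((x' :: xs') ++ ys) := rfl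
      rw [this, List.cons_append, PySem.Chars.join_cons_cons, ← List.cons_append,
        ih (by simp) , PySem.Chars.join_cons_cons]
      simp [List.append_assoc]

lemma join_flatten (sep : List Char) (gs : List (List (List Char))) (h : ∀ g ∈ gs, g ≠ []) :
    PySem.Chars.join sep gs.flatten = PySem.Chars.join sep (gs.map (PySem.Chars.join sep)) := by
  induction gs with
  | nil => rfl
  | cons g gs ih =>
    cases gs with
    | nil => simp [PySem.Chars.join_singleton]
    | cons g' gs' =>
      have hg : g ≠ [] := h g (by simp)
      have hflat : (g' :: gs').flatten ≠ [] := by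
        have hg' : g' ≠ [] := h g' (by simp)
        simp only [List.flatten_cons]
        intro hcontr
        exact hg' (List.append_eq_nil_iff.mp hcontr).1
      rw [List.flatten_cons, join_append_ne_nil sep g _ hg hflat,
        ih (fun a ha => h a (by simp [ha]))]
      simp only [List.map_cons]
      rw [PySem.Chars.join_cons_cons]

lemma rstrip_append_allspace (cs sp : List Char) (h : ∀ c ∈ sp, PySem.Chars.isspace c = true) :
    PySem.Chars.rstrip (cs ++ sp) = PySem.Chars.rstrip cs := by
  unfold PySem.Chars.rstrip
  rw [List.reverse_append, List.dropWhile_append]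
  have : List.dropWhile PySem.Chars.isspace sp.reverse = [] := by
    rw [List.dropWhile_eq_nil_iff]
    intro c hc; exact h c (List.mem_reverse.mp hc)
  simp [this]

lemma rstrip_of_getLast (cs : List Char) (c : Char) (h : cs.getLast? = some c)
    (hc : PySem.Chars.isspace c = false) : PySem.Chars.rstrip cs = cs := by
  unfold PySem.Chars.rstrip
  cases hrev : cs.reverse with
  | nil => simp_all
  | cons a tl =>
    have ha : a = c := by
      have := List.head?_reverse (l := cs)
      rw [hrev] at this; simp [h] at this; exact this
    subst ha
    rw [List.dropWhile_cons_of_neg (by simp [hc]), ← hrev, List.reverse_reverse]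

lemma flatten_map_append_sp {α : Type} (sp : List Char) (f : α → List Char) (l : List α) (h : l ≠ []) :
    (l.map (fun d => f d ++ sp)).flatten = PySem.Chars.join sp (l.map f) ++ sp := by
  induction l with
  | nil => exact absurd rfl h
  | cons d l ih =>
    cases l with
    | nil => simp [PySem.Chars.join_singleton]
    | cons d' l' =>
      rw [List.map_cons, List.flatten_cons, ih (by simp)]
      simp only [List.map_cons]
      rw [PySem.Chars.join_cons_cons]
      simp [List.append_assoc]

lemma getLast_join_parts (sp : List Char) (parts : List (List Char))
    (h : parts ≠ []) (h0 : ∀ p ∈ parts, ∃ q, p = q ++ ['0']) :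
    (PySem.Chars.join sp parts).getLast? = some '0' := by
  induction parts using List.reverseRecOn with
  | nil => exact absurd rfl h
  | append_singleton ps p ihp =>
    obtain ⟨q, hq⟩ := h0 p (by simp)
    cases ps with
    | nil => simp [PySem.Chars.join_singleton, hq, List.getLast?_append]
    | cons a ps' =>
      rw [join_append_ne_nil sp _ [p] (by simp) (by simp), PySem.Chars.join_singleton, hq]
      simp [List.getLast?_append]

lemma foldA (P : Int → List Char) (nd g : Int) (init : List Char) (n : Int) (hn : 0 ≤ n) :
    (PySem.List.pyRange 0 n 1).foldl (fun line i => if g + i < nd then line ++ P (g + i) else line) init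
    = init ++ ((PySem.List.pyRange g (min (g + n) nd) 1).map P).flatten := by
  induction n, hn using Int.le_induction with
  | base =>
    rw [PySem.List.pyRange_one_eq_nil le_rfl, PySem.List.pyRange_one_eq_nil (by omega)]
    simp
  | succ n hn ih =>
    rw [PySem.List.pyRange_one_succ_right hn, List.foldl_append]
    rw [ih]
    simp only [List.foldl_cons, List.foldl_nil]
    by_cases hlt : g + n < nd
    · rw [if_pos hlt]
      have h1 : min (g + (n + 1)) nd = min (g + n) nd + 1 := by omega
      rw [h1, PySem.List.pyRange_one_succ_right (by omega)]
      have h2 : min (g + n) nd = g + n := by omega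
      rw [h2]
      simp [List.append_assoc]
    · rw [if_neg hlt]
      have h1 : min (g + (n + 1)) nd = min (g + n) nd := by omega
      rw [h1]

lemma toList_foldl (f : String → Int → String) (g : List Char → Int → List Char)
    (h : ∀ s x, (f s x).toList = g s.toList x) (l : List Int) (s : String) :
    (l.foldl f s).toList = l.foldl g s.toList := by
  induction l generalizing s with
  | nil => rfl
  | cons x l ih => rw [List.foldl_cons, List.foldl_cons, ih, h]

set_option maxRecDepth 4096 in
lemma dimLine_eq (nd g : Int) (hg : g < nd) :
    (pvDimLineA nd g).toList = (pvDimLineB nd g).toList := by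
  have hdims : PySem.List.pyRange g (min (g + 8) nd) 1 ≠ [] := by
    rw [PySem.List.pyRange_one_cons (by omega)]
    simp
  unfold pvDimLineA pvDimLineB
  rw [PySem.Str.toList_rstrip]
  rw [toList_foldl _ (fun line i => if g + i < nd then line ++ (pvPartL (g + i) ++ pvSp3) else line)
    (by
      intro s x
      by_cases hx : g + x < nd
      · simp only [if_pos hx, String.toList_append, pvPartL, PySem.Int.toList_toStr, pvSp3]
        have : ("\": Initialize=0   ").toList = "\": Initialize=0".toList ++ [' ', ' ', ' '] := by decide
        simp [this, List.append_assoc]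
      · simp only [if_neg hx])]
  have hinit : ("    ").toList = pvSp4 := by decide
  rw [hinit, foldA (fun d => pvPartL d ++ pvSp3) nd g pvSp4 8 (by omega)]
  rw [flatten_map_append_sp pvSp3 pvPartL _ hdims]
  rw [← List.append_assoc]
  have hsp3all : ∀ c ∈ pvSp3, PySem.Chars.isspace c = true := by
    intro c hc
    simp only [pvSp3, List.mem_cons, List.not_mem_nil, or_false] at hc
    rcases hc with rfl | rfl | rfl <;> decide
  rw [rstrip_append_allspace _ pvSp3 hsp3all]
  rw [rstrip_of_getLast _ '0' ?hlast (by decide)]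
  · -- equality with B's line
    rw [String.toList_append, PySem.Str.toList_join]
    have hsp3 : ("   ").toList = pvSp3 := by decide
    rw [hsp3, hinit, List.map_map]
    congr 2
    apply List.map_congr_left
    intro d _
    simp [pvPartL, PySem.Int.toList_toStr, Function.comp]
  case hlast =>
    rw [List.getLast?_append]
    rw [getLast_join_parts pvSp3 _ (by simpa using hdims)
      (by
        intro p hp
        obtain ⟨d, _, rfl⟩ := List.mem_map.mp hp
        refine ⟨"\"d".toList ++ PySem.Int.toChars d ++ "\": Initialize=".toList, ?_⟩
        have hsplit : ("\": Initialize=0").toList = ("\": Initialize=").toList ++ ['0'] := by decide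
        simp only [pvPartL, hsplit, List.append_assoc])]
    rfl

lemma genA_shape (nt nd : Int) :
    generate_token_pools nt nd =
    PySem.Str.join "\n" (pvHdr ++ (PySem.List.pyRange 0 nt 1).flatMap (pvBlockA nt nd)) := by
  have hfun : (fun (output : List String) (token_id : Int) =>
      let output := output ++ ["FixedPool.Embeddings_Token_" ++ PySem.Int.toStr token_id ++ " {"]
      let output := (PySem.List.pyRange 0 nd 8).foldl (fun output dim_group =>
        let line := (PySem.List.pyRange 0 8 1).foldl (fun line i =>
          let dim := dim_group + i
          if dim < nd then line ++ "\"d" ++ PySem.Int.toStr dim ++ "\": Initialize=0   " else line) "    "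
        output ++ [PySem.Str.rstrip line]) output
      let output := output ++ ["}\n"]
      if PySem.Int.mod (token_id + 1) 500 = 0 then
        output ++ ["// Progress: " ++ PySem.Int.toStr (token_id + 1) ++ "/" ++ PySem.Int.toStr nt ++ " tokens defined\n"]
      else output)
      = (fun (acc : List String) (t : Int) => acc ++ pvBlockA nt nd t) := by
    funext output t
    dsimp only
    rw [show (List.foldl (fun (output : List String) (dim_group : Int) =>
        let line := (PySem.List.pyRange 0 8 1).foldl (fun line i =>
          let dim := dim_group + i
          if dim < nd then line ++ "\"d" ++ PySem.Int.toStr dim ++ "\": Initialize=0   " else line) "    "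
        output ++ [PySem.Str.rstrip line])
        (output ++ ["FixedPool.Embeddings_Token_" ++ PySem.Int.toStr t ++ " {"]) (PySem.List.pyRange 0 nd 8))
      = (output ++ ["FixedPool.Embeddings_Token_" ++ PySem.Int.toStr t ++ " {"]) ++ (PySem.List.pyRange 0 nd 8).map (pvDimLineA nd)
      from PySem.List.foldl_append_singleton_eq_map (pvDimLineA nd) _ _]
    unfold pvBlockA
    split_ifs <;> simp [List.append_assoc]
  show PySem.Str.join "\n" ((PySem.List.pyRange 0 nt 1).foldl _ (([] : List String) ++ _ ++ _ ++ _ ++ _)) = _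
  rw [hfun, PySem.List.foldl_append_eq_flatMap]
  rfl

lemma genB_shape (nt nd : Int) :
    generate_token_pools_alt nt nd =
    PySem.Str.join "\n" (pvHdrB :: (PySem.List.pyRange 0 nt 1).map (pvPieceB nt nd)) := by
  show PySem.Str.join "\n" (if 0 < nt then _ else [pvHdrB]) = _
  by_cases hnt : 0 < nt
  · rw [if_pos hnt]
    rw [show ((PySem.List.pyRange 0 nd 8).foldl (fun (dim_lines : List String) (g : Int) =>
        dim_lines ++ ["    " ++ PySem.Str.join "   "
          ((PySem.List.pyRange g (min (g + 8) nd) 1).map (fun d =>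
            "\"d" ++ PySem.Int.toStr d ++ "\": Initialize=0"))]) ([] : List String))
        = ([] : List String) ++ (PySem.List.pyRange 0 nd 8).map (pvDimLineB nd)
        from PySem.List.foldl_append_singleton_eq_map (pvDimLineB nd) _ _]
    show PySem.Str.join "\n" ((PySem.List.pyRange 0 nt 1).foldl (fun (pieces : List String) (t : Int) =>
        let piece := "FixedPool.Embeddings_Token_" ++ PySem.Int.toStr t ++ " {\n" ++
          PySem.Str.join "\n" (([] : List String) ++ (PySem.List.pyRange 0 nd 8).map (pvDimLineB nd) ++ ["}\n"])
        let piece := if PySem.Int.mod (t + 1) 500 = 0 then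
          piece ++ "\n// Progress: " ++ PySem.Int.toStr (t + 1) ++ "/" ++ PySem.Int.toStr nt ++ " tokens defined\n"
        else piece
        pieces ++ [piece]) [pvHdrB]) = _
    rw [show ((PySem.List.pyRange 0 nt 1).foldl (fun (pieces : List String) (t : Int) =>
        let piece := "FixedPool.Embeddings_Token_" ++ PySem.Int.toStr t ++ " {\n" ++
          PySem.Str.join "\n" (([] : List String) ++ (PySem.List.pyRange 0 nd 8).map (pvDimLineB nd) ++ ["}\n"])
        let piece := if PySem.Int.mod (t + 1) 500 = 0 then
          piece ++ "\n// Progress: " ++ PySem.Int.toStr (t + 1) ++ "/" ++ PySem.Int.toStr nt ++ " tokens defined\n"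
        else piece
        pieces ++ [piece]) [pvHdrB])
        = [pvHdrB] ++ (PySem.List.pyRange 0 nt 1).map (pvPieceB nt nd)
        from PySem.List.foldl_append_singleton_eq_map (pvPieceB nt nd) _ _]
    rfl
  · rw [if_neg hnt, PySem.List.pyRange_one_eq_nil (by omega)]
    rfl

lemma block_eq (nt nd t : Int) :
    PySem.Chars.join ['\n'] ((pvBlockA nt nd t).map String.toList) = (pvPieceB nt nd t).toList := by
  have hdl : ∀ g ∈ PySem.List.pyRange 0 nd 8, (pvDimLineA nd g).toList = (pvDimLineB nd g).toList := by
    intro g hgmem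
    have := (PySem.List.mem_pyRange_iff_of_pos (a := 0) (b := nd) (by omega : (0:Int) < 8) g).mp hgmem
    exact dimLine_eq nd g this.2.1
  have hNL : ("\n").toList = ['\n'] := by decide
  have hmapeq : ((PySem.List.pyRange 0 nd 8).map (pvDimLineA nd)).map String.toList
      = ((PySem.List.pyRange 0 nd 8).map (pvDimLineB nd)).map String.toList := by
    rw [List.map_map, List.map_map]
    exact List.map_congr_left (fun g hg => hdl g hg)
  have hjoin_tail : PySem.Chars.join ['\n']
        ((((PySem.List.pyRange 0 nd 8).map (pvDimLineA nd)) ++ ["}\n"]).map String.toList)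
      = (PySem.Str.join "\n" ((PySem.List.pyRange 0 nd 8).map (pvDimLineB nd) ++ ["}\n"])).toList := by
    rw [PySem.Str.toList_join, hNL, List.map_append, List.map_append, hmapeq]
  have htailne : (((PySem.List.pyRange 0 nd 8).map (pvDimLineA nd)) ++ ["}\n"]).map String.toList ≠ [] := by
    simp
  unfold pvBlockA pvPieceB
  by_cases hmod : PySem.Int.mod (t + 1) 500 = 0
  · rw [if_pos hmod, if_pos hmod]
    rw [show ("FixedPool.Embeddings_Token_" ++ PySem.Int.toStr t ++ " {") ::
        (((PySem.List.pyRange 0 nd 8).map (pvDimLineA nd)) ++ ["}\n"] ++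
          ["// Progress: " ++ PySem.Int.toStr (t + 1) ++ "/" ++ PySem.Int.toStr nt ++ " tokens defined\n"])
        = ["FixedPool.Embeddings_Token_" ++ PySem.Int.toStr t ++ " {"] ++
          (((PySem.List.pyRange 0 nd 8).map (pvDimLineA nd)) ++ ["}\n"]) ++
          ["// Progress: " ++ PySem.Int.toStr (t + 1) ++ "/" ++ PySem.Int.toStr nt ++ " tokens defined\n"]
        from by simp [List.append_assoc]]
    rw [List.map_append, List.map_append]
    rw [join_append_ne_nil _ _ _ (by simp) (by simp)]
    rw [join_append_ne_nil _ _ _ (by simp) htailne]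
    rw [hjoin_tail]
    simp only [List.map_cons, List.map_nil, PySem.Chars.join_singleton, String.toList_append,
      PySem.Int.toList_toStr]
    have h2 : ('\n' :: ("// Progress: ").toList) = ("\n// Progress: ").toList := by decide
    simp only [List.append_assoc, List.singleton_append]
    rw [← h2]
    simp
  · rw [if_neg hmod, if_neg hmod]
    simp only [List.append_nil]
    rw [show ("FixedPool.Embeddings_Token_" ++ PySem.Int.toStr t ++ " {") ::
        (((PySem.List.pyRange 0 nd 8).map (pvDimLineA nd)) ++ ["}\n"])
        = ["FixedPool.Embeddings_Token_" ++ PySem.Int.toStr t ++ " {"] ++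
          (((PySem.List.pyRange 0 nd 8).map (pvDimLineA nd)) ++ ["}\n"]) from rfl]
    rw [List.map_append]
    rw [join_append_ne_nil _ _ _ (by simp) htailne]
    rw [hjoin_tail]
    simp only [List.map_cons, List.map_nil, PySem.Chars.join_singleton, String.toList_append,
      PySem.Int.toList_toStr]
    simp [List.append_assoc]

-- ===== VERDICT (by name: the statement is the Claim_ definition above) =====
set_option maxRecDepth 16384 in
theorem generate_token_pools_spec : Claim_equal_generate_token_pools := by
  intro nt nd _
  unfold Spec_generate_token_pools
  rw [genA_shape, genB_shape]
  unfold PySem.Str.join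
  refine congrArg String.ofList ?_
  have hNL : ("\n").toList = ['\n'] := by rfl
  rw [hNL]
  have hgs : (pvHdr ++ (PySem.List.pyRange 0 nt 1).flatMap (pvBlockA nt nd)).map String.toList
      = ((pvHdr.map String.toList) :: (PySem.List.pyRange 0 nt 1).map (fun t => (pvBlockA nt nd t).map String.toList)).flatten := by
    simp [List.flatMap_def, Function.comp_def]
  rw [hgs, join_flatten _ _ (by
    intro g hg
    rcases List.mem_cons.mp hg with rfl | hmem
    · simp [pvHdr]
    · obtain ⟨t, _, rfl⟩ := List.mem_map.mp hmem
      simp [pvBlockA])]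
  simp only [List.map_cons, List.map_map]
  refine congrArg (PySem.Chars.join ['\n']) (congrArg₂ List.cons ?_ ?_)
  · decide
  · apply List.map_congr_left
    intro t _
    exact block_eq nt nd t
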